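-- pv_equiv track=rewrite | github.com/letroyeluca/InformaticaUA-Archive | Inleiding Programmeren/PycharmProjects/2024-10-18W4vr/Oefening11.py | minimum_elements
-- ===== SOURCE A (Python) =====
-- def minimum_elements(lijst):
--     if not lijst:
--         return
--     kleinste = lijst[0]
--     for element in lijst:
--         if element < kleinste:
--             kleinste = element
--     teller =  0
--     for element in lijst:
--         if element == kleinste:
--             teller+=1
--     return (kleinste, teller)
-- ===== SOURCE B (Python) =====
-- def minimum_elements(lijst):
--     if not lijst:
--         return
--     kleinste = lijst[0]
--     teller = 0
--     for element in lijst: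
--         if element < kleinste:
--             kleinste = element
--             teller = 1
--         elif element == kleinste:
--             teller += 1
--     return (kleinste, teller)
-- ===== Notes on version B (the rewrite author's own statement) =====
-- stated objective: alternative
-- what changed: Replaces A's two sequential passes (find the minimum, then count it) with a single pass that maintains the current minimum and its running count, resetting the count to 1 whenever a new minimum appears.
import Mathlib
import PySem

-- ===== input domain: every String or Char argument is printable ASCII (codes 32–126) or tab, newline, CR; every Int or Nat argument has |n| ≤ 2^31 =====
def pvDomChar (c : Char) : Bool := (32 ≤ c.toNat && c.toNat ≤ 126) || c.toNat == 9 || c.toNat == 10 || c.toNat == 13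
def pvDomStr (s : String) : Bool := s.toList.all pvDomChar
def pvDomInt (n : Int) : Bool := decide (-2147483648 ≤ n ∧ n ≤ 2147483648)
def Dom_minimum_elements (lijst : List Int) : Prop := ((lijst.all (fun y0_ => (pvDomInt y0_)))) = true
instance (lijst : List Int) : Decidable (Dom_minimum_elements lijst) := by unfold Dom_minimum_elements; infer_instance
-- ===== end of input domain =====

-- B replaces A's two passes (find minimum, then count it) with a single pass keeping the
-- running minimum and its count; same O(n) cost, different decomposition.


-- ===== PORT A =====
-- literal port of A: empty guard, a pass computing the minimum, then a pass counting it
def minimum_elements (lijst : List Int) : Option (Int × Int) :=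
  match lijst with
  | [] => none
  | h :: _ =>
    let kleinste := lijst.foldl (fun k e => if e < k then e else k) h
    let teller := lijst.foldl (fun t e => if e = kleinste then t + 1 else t) (0 : Int)
    some (kleinste, teller)

-- ===== PORT B =====
-- literal port of B: single pass maintaining (kleinste, teller)
def minimum_elements_alt (lijst : List Int) : Option (Int × Int) :=
  match lijst with
  | [] => none
  | h :: _ =>
    some (lijst.foldl
      (fun (p : Int × Int) e =>
        if e < p.1 then (e, 1)
        else if e = p.1 then (p.1, p.2 + 1)
        else p)
      (h, 0))

-- ===== PRECONDITION & SPEC =====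
def Spec_minimum_elements (lijst : List Int) (out : Option (Int × Int)) : Prop := out = minimum_elements_alt lijst
instance (lijst : List Int) (out : Option (Int × Int)) : Decidable (Spec_minimum_elements lijst out) := by unfold Spec_minimum_elements; infer_instance

-- ===== CLAIM (what is proved, stated in full; the proofs are below) =====
def Claim_equal_minimum_elements : Prop := ∀ (lijst : List Int), Dom_minimum_elements lijst → Spec_minimum_elements lijst (minimum_elements lijst)

-- ===== LEMMAS AND PROOFS =====

-- the running minimum never exceeds its seed
theorem pvFoldMin_le (l : List Int) : ∀ (m : Int),
    l.foldl (fun k e => if e < k then e else k) m ≤ m := by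
  induction l with
  | nil => intro m; simp
  | cons e l ih =>
    intro m
    simp only [List.foldl_cons]
    by_cases h : e < m
    · simp only [h, if_pos]
      exact le_trans (ih e) (le_of_lt h)
    · simp only [h, if_neg, not_false_iff]
      exact ih m

-- counting fold with seed t = t + counting fold with seed 0
theorem pvCount_shift (M : Int) (l : List Int) : ∀ (t : Int),
    l.foldl (fun t e => if e = M then t + 1 else t) t
      = t + l.foldl (fun t e => if e = M then t + 1 else t) 0 := by
  induction l with
  | nil => intro t; simp
  | cons e l ih =>
    intro t
    simp only [List.foldl_cons]
    by_cases h : e = M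
    · simp only [h, if_pos]
      rw [ih (t + 1), show (0:Int) + 1 = 1 by norm_num, ih 1]; ring
    · simp [h, ih t]

-- invariant of B's single pass: it computes the minimum together with
-- (count of that minimum in l, plus the carried count if the minimum did not change)
theorem pvSingle_pass (l : List Int) : ∀ (m t : Int),
    l.foldl
      (fun (p : Int × Int) e =>
        if e < p.1 then (e, 1)
        else if e = p.1 then (p.1, p.2 + 1)
        else p)
      (m, t)
    = (l.foldl (fun k e => if e < k then e else k) m,
       (if l.foldl (fun k e => if e < k then e else k) m = m then t else 0)
         + l.foldl
             (fun t e => if e = l.foldl (fun k e => if e < k then e else k) m then t + 1 else t)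
             0) := by
  induction l with
  | nil => intro m t; simp
  | cons e l ih =>
    intro m t
    simp only [List.foldl_cons]
    by_cases h : e < m
    · -- new minimum found: count restarts at 1
      simp only [h, if_pos]
      rw [ih e 1]
      have hM := pvFoldMin_le l e
      set M := l.foldl (fun k e => if e < k then e else k) e with hMdef
      by_cases hMe : M = e
      · have hne : ¬ (M = m) := by omega
        simp only [hMe, if_pos]
        rw [show (0:Int) + 1 = 1 by norm_num, pvCount_shift e l 1]
        have hem : ¬ (e = m) := by omega
        simp [hem]
      · have h1 : ¬ (M = m) := by omega
        have h2 : ¬ (e = M) := by omega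
        simp [hMe, h1, h2]
    · -- minimum unchanged: count increments iff e equals it
      simp only [h, if_neg, not_false_iff]
      by_cases he : e = m
      · simp only [he, if_pos]
        rw [ih m (t + 1)]
        have hM := pvFoldMin_le l m
        set M := l.foldl (fun k e => if e < k then e else k) m with hMdef
        by_cases hMm : M = m
        · simp only [hMm, if_pos]
          rw [show (0:Int) + 1 = 1 by norm_num, pvCount_shift m l 1]
          simp; ring
        · have h2 : ¬ (m = M) := by omega
          simp [hMm, h2]
      · simp only [he, if_neg, not_false_iff]
        rw [ih m t]
        have hM := pvFoldMin_le l m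
        set M := l.foldl (fun k e => if e < k then e else k) m with hMdef
        have h2 : ¬ (e = M) := by omega
        simp [h2]

-- ===== VERDICT (by name: the statement is the Claim_ definition above) =====
theorem minimum_elements_spec : Claim_equal_minimum_elements := by
  intro lijst _
  unfold Spec_minimum_elements minimum_elements minimum_elements_alt
  match lijst with
  | [] => rfl
  | h :: tl =>
    simp only
    rw [pvSingle_pass (h :: tl) h 0]
    simp
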